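-- pv_equiv track=rewrite | github.com/0xStryK3R/Scaler-DSA-Revision | python/Day-50/HW_4.py | areSame
-- ===== SOURCE A (Python) =====
-- MAX_CHAR = 26
--
-- def adjSign(s, i):
--     if i == 0:
--         return 1
--     if s[i - 1] == "-":
--         return 0
--     return 1
--
-- def evaluate(s, v, add):
--     stk = []
--     stk.append(1)
--     n = len(s)
--     i = 0
--     while i < n:
--         if s[i] == "+" or s[i] == "-":
--             i += 1
--             continue
--
--         if s[i] == "(":
--             if adjSign(s, i):
--                 stk.append(stk[-1])
--             else:
--                 stk.append(1 - stk[-1])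
--
--         elif s[i] == ")":
--             stk.pop()
--
--         else:
--             if stk[-1]:
--                 if adjSign(s, i):
--                     if add == 1:
--                         v[ord(s[i]) - 97] += 1
--                     else:
--                         v[ord(s[i]) - 97] -= 1
--                 else:
--                     if add == 1:
--                         v[ord(s[i]) - 97] -= 1
--                     else:
--                         v[ord(s[i]) - 97] += 1
--                 # v[ord(s[i]) - 97] += (adjSign(s, i) ? add ? 1 : -1 : add ? -1 : 1);
--             else:
--                 if adjSign(s, i):
--                     if add == 1:
--                         v[ord(s[i]) - 97] -= 1
--                     else:
--                         v[ord(s[i]) - 97] += 1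
--                 else:
--                     if add == 1:
--                         v[ord(s[i]) - 97] += 1
--                     else:
--                         v[ord(s[i]) - 97] -= 1
--
--         i += 1
--
-- def areSame(expr1, expr2):
--     v = [0] * MAX_CHAR
--     evaluate(expr1, v, 1)
--     evaluate(expr2, v, 0)
--     for i in range(MAX_CHAR):
--         if v[i] != 0:
--             return 0
--     return 1
-- ===== SOURCE B (Python) =====
-- MAX_CHAR = 26
--
--
-- def _coeffs(s):
--     """Coefficient vector of the expression via recursive descent over the
--     nested parentheses, carrying an inherited sign multiplier (+1/-1)."""
--     v = [0] * MAX_CHAR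
--     n = len(s)
--
--     def go(i, sign):
--         while i < n:
--             c = s[i]
--             local = -1 if i > 0 and s[i - 1] == "-" else 1
--             if c == "+" or c == "-":
--                 i += 1
--             elif c == "(":
--                 i = go(i + 1, sign * local)
--             elif c == ")":
--                 return i + 1
--             else:
--                 v[(ord(c) - 97) % 26] += sign * local
--                 i += 1
--         return i
--
--     go(0, 1)
--     return v
--
--
-- def areSame(expr1, expr2):
--     return 1 if _coeffs(expr1) == _coeffs(expr2) else 0
-- ===== Notes on version B (the rewrite author's own statement) =====
-- stated objective: alternative
-- what changed: The explicit while-loop with a 0/1 sign stack writing into one shared array is replaced by a recursive descent over the nested parentheses carrying a +1/-1 sign multiplier, building one coefficient array per expression and comparing them.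
import Mathlib
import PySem

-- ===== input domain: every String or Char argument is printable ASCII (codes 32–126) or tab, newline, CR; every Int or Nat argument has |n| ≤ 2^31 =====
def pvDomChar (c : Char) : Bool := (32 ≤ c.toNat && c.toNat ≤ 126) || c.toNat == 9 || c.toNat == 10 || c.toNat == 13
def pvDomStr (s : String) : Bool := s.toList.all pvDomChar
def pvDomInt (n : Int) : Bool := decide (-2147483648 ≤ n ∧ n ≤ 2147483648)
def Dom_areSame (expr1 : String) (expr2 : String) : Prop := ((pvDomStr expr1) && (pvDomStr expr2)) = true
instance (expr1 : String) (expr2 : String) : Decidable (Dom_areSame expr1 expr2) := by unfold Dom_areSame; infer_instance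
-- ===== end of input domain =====

-- B re-implements the evaluator as a recursive descent over the nested parentheses carrying a
-- ±1 sign multiplier, building one coefficient array per expression and comparing them, instead
-- of A's single while-loop with a 0/1 sign stack writing into one shared array (objective:
-- alternative decomposition, same asymptotic cost).

-- ===== PORT A =====
-- helper: Python adjSign(s, i); s[i-1] is always in range at call sites (i ≥ 1), ported via getElem?.
def adjSignA (s : List Char) (i : Nat) : Int :=
  if i = 0 then 1
  else if s[i-1]? = some '-' then 0 else 1

-- the while-loop of evaluate(s, v, add): i advances by 1 in every branch; stack top = stk.headD 0
-- and v[ord(c)-97] (Python wraps a negative index) is ported as the index ((c.toNat-97) % 26).toNat,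
-- exact whenever Python does not raise IndexError (Pre_ excludes the raising inputs).
def loopA (s : List Char) (add : Int) (stk : List Int) (v : List Int) (i : Nat) : List Int :=
  if h : i < s.length then
    let c := s[i]
    if c = '+' ∨ c = '-' then loopA s add stk v (i+1)
    else if c = '(' then
      loopA s add ((if adjSignA s i = 1 then stk.headD 0 else 1 - stk.headD 0) :: stk) v (i+1)
    else if c = ')' then loopA s add stk.tail v (i+1)
    else
      let j := (((c.toNat : Int) - 97) % 26).toNat
      let d : Int :=
        if stk.headD 0 ≠ 0 then
          (if adjSignA s i = 1 then (if add = 1 then 1 else -1) else (if add = 1 then -1 else 1))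
        else
          (if adjSignA s i = 1 then (if add = 1 then -1 else 1) else (if add = 1 then 1 else -1))
      loopA s add stk (v.modify j (· + d)) (i+1)
  else v
termination_by s.length - i
decreasing_by all_goals omega

def evaluateA (s : List Char) (v : List Int) (add : Int) : List Int := loopA s add [1] v 0

def areSame (expr1 : String) (expr2 : String) : Int :=
  let v := List.replicate 26 (0 : Int)
  let v1 := evaluateA expr1.toList v 1
  let v2 := evaluateA expr2.toList v1 0
  if (List.range 26).any (fun i => v2.getD i 0 != 0) then 0 else 1

-- ===== PORT B =====
-- go(i, sign) of Source B: while-loop as tail recursion, recursing with sign*local at '(' and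
-- returning past the matching ')'; fuel s.length+1 only bounds the recursion (each nested
-- call strictly advances i, so the fuel is never exhausted on a call from coeffsB).
def goB (s : List Char) : Nat → Nat → Int → List Int → List Int × Nat
  | 0, i, _, v => (v, i)
  | fuel+1, i, sign, v =>
    if h : i < s.length then
      let c := s[i]
      let loc : Int := if 0 < i ∧ s[i-1]? = some '-' then -1 else 1
      if c = '+' ∨ c = '-' then goB s fuel (i+1) sign v
      else if c = '(' then
        let r := goB s fuel (i+1) (sign * loc) v
        goB s fuel r.2 sign r.1
      else if c = ')' then (v, i+1)
      else goB s fuel (i+1) sign (v.modify (((c.toNat : Int) - 97) % 26).toNat (· + sign * loc))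
    else (v, i)

def coeffsB (s : List Char) : List Int := (goB s (s.length + 1) 0 1 (List.replicate 26 0)).1

def areSame_alt (expr1 : String) (expr2 : String) : Int :=
  if coeffsB expr1.toList = coeffsB expr2.toList then 1 else 0

-- ===== PRECONDITION & SPEC =====
-- balI s k: (#')' - #'(') in the first k characters (closed form, used only by Pre_).
def balI (s : List Char) (k : Nat) : Int :=
  ((s.take k).count ')' : Int) - ((s.take k).count '(' : Int)

-- Pre_ excludes exactly the inputs where Python A raises IndexError — a character outside
-- '+','-','(',')' whose code is not in [71,122] (v[ord(c)-97] out of range even after Python's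
-- negative-index wrap), or any character other than '+'/'-' after a prefix with more ')' than
-- '(' (the sign stack has underflowed and A's next stack access fails).
def Pre_areSame (expr1 : String) (expr2 : String) : Prop :=
  ((expr1.toList.all fun c => c == '+' || c == '-' || c == '(' || c == ')' ||
      (decide (71 ≤ c.toNat) && decide (c.toNat ≤ 122))) = true ∧
    (∀ k, k < expr1.toList.length → (balI expr1.toList (k+1) ≤ 0 ∨
      ∀ q, q < expr1.toList.length → (q ≤ k ∨
        expr1.toList.getD q ' ' = '+' ∨ expr1.toList.getD q ' ' = '-')))) ∧
  ((expr2.toList.all fun c => c == '+' || c == '-' || c == '(' || c == ')' ||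
      (decide (71 ≤ c.toNat) && decide (c.toNat ≤ 122))) = true ∧
    (∀ k, k < expr2.toList.length → (balI expr2.toList (k+1) ≤ 0 ∨
      ∀ q, q < expr2.toList.length → (q ≤ k ∨
        expr2.toList.getD q ' ' = '+' ∨ expr2.toList.getD q ' ' = '-'))))
instance (expr1 : String) (expr2 : String) : Decidable (Pre_areSame expr1 expr2) := by
  unfold Pre_areSame; infer_instance

def pvWitness_areSame : String × String := ("(a-b)", "a-b")

def Spec_areSame (expr1 : String) (expr2 : String) (out : Int) : Prop := out = areSame_alt expr1 expr2
instance (expr1 : String) (expr2 : String) (out : Int) : Decidable (Spec_areSame expr1 expr2 out) := by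
  unfold Spec_areSame; infer_instance

-- ===== CLAIM (what is proved, stated in full; the proofs are below) =====
def Claim_equal_areSame : Prop := ∀ (expr1 : String) (expr2 : String), Dom_areSame expr1 expr2 → Pre_areSame expr1 expr2 → Spec_areSame expr1 expr2 (areSame expr1 expr2)

-- ===== LEMMAS AND PROOFS =====

-- past the end, both recursions are the identity
lemma loopA_stop (s : List Char) (add : Int) (stk v : List Int) (i : Nat) (h : s.length ≤ i) :
    loopA s add stk v i = v := by
  rw [loopA]; simp [Nat.not_lt.mpr h]

lemma goB_stop (s : List Char) (fuel i : Nat) (sign : Int) (v : List Int) (h : s.length ≤ i) :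
    goB s fuel i sign v = (v, i) := by
  cases fuel with
  | zero => rfl
  | succ fuel => rw [goB]; simp [Nat.not_lt.mpr h]

lemma goB_ge (s : List Char) : ∀ (fuel i : Nat) (sign : Int) (v : List Int),
    i ≤ (goB s fuel i sign v).2 := by
  intro fuel
  induction fuel with
  | zero => intro i sign v; simp [goB]
  | succ fuel ih =>
    intro i sign v
    rw [goB]
    by_cases h : i < s.length
    · simp only [h, dif_pos]
      split_ifs <;>
        first
          | exact Nat.le_succ i
          | exact le_trans (Nat.le_succ i) (ih _ _ _)
          | exact le_trans (Nat.le_succ i) (le_trans (ih _ _ _) (ih _ _ _))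
    · simp [h]

lemma goB_length (s : List Char) : ∀ (fuel i : Nat) (sign : Int) (v : List Int),
    (goB s fuel i sign v).1.length = v.length := by
  intro fuel
  induction fuel with
  | zero => intro i sign v; simp [goB]
  | succ fuel ih =>
    intro i sign v
    rw [goB]
    by_cases h : i < s.length
    · simp only [h, dif_pos]
      split_ifs <;>
        first
          | rfl
          | exact ih _ _ _
          | exact (ih _ _ _).trans (ih _ _ _)
          | exact (ih _ _ _).trans (by simp)
    · simp [h]

-- the balance of a prefix, one step
lemma balI_succ (s : List Char) (k : Nat) (h : k < s.length) :
    balI s (k+1) = balI s k + (if s[k] = ')' then 1 else if s[k] = '(' then -1 else 0) := by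
  unfold balI
  rw [List.take_add_one, List.getElem?_eq_getElem h]
  by_cases h1 : s[k] = ')'
  · rw [if_pos h1]
    simp only [Option.toList_some, List.count_append, h1, List.count_cons, List.count_nil,
      beq_iff_eq]
    simp
    ring
  · rw [if_neg h1]
    by_cases h2 : s[k] = '('
    · rw [if_pos h2]
      simp only [Option.toList_some, List.count_append, h2, List.count_cons, List.count_nil,
        beq_iff_eq]
      simp
      ring
    · rw [if_neg h2]
      simp only [Option.toList_some, List.count_append, List.count_cons, List.count_nil,
        beq_iff_eq]
      simp [h1, h2]

-- GoDisj s i j: goB's scan from i either consumed the whole string with the balance never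
-- rising above the entry balance, or it stopped just past a ')' that raised the balance by one
def GoDisj (s : List Char) (i j : Nat) : Prop :=
  (s.length ≤ j ∧ ∀ k, i ≤ k → k ≤ s.length → balI s k ≤ balI s i) ∨
  (j ≤ s.length ∧ i < j ∧ balI s j = balI s i + 1 ∧
    ∀ k, i ≤ k → k < j → balI s k ≤ balI s i)

-- transfer the stop-disjunction across one balance-preserving character
lemma shiftDisj (s : List Char) (i j : Nat) (heq : balI s (i+1) = balI s i)
    (H : GoDisj s (i+1) j) : GoDisj s i j := by
  unfold GoDisj at H ⊢
  rcases H with ⟨h1, h2⟩ | ⟨h1, h2, h3, h4⟩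
  · refine Or.inl ⟨h1, fun k hk1 hk2 => ?_⟩
    rcases Nat.lt_or_ge k (i+1) with hk | hk
    · have hki : k = i := by omega
      simp [hki]
    · have := h2 k hk hk2; linarith
  · refine Or.inr ⟨h1, by omega, by linarith, fun k hk1 hk2 => ?_⟩
    rcases Nat.lt_or_ge k (i+1) with hk | hk
    · have hki : k = i := by omega
      simp [hki]
    · have := h4 k hk hk2; linarith

-- combine the inner segment's disjunction with the continuation's, across a '('
lemma parenDisj (s : List Char) (i j1 j2 : Nat) (h : i < s.length) (hpar : s[i] = '(')
    (hj1 : i + 1 ≤ j1) (H1 : GoDisj s (i+1) j1) (H2 : GoDisj s j1 j2)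
    (hstop : s.length ≤ j1 → j2 = j1) : GoDisj s i j2 := by
  unfold GoDisj at H1 H2 ⊢
  have heq : balI s (i+1) = balI s i + (-1) := by
    rw [balI_succ s i h]; simp [hpar]
  rcases H1 with ⟨hl1, hk1⟩ | ⟨hle1, hlt1, heq1, hk1⟩
  · have hj2 : j2 = j1 := hstop hl1
    subst hj2
    refine Or.inl ⟨hl1, fun k hka hkb => ?_⟩
    rcases Nat.lt_or_ge k (i+1) with hk | hk
    · have hki : k = i := by omega
      simp [hki]
    · have := hk1 k hk hkb; linarith
  · rcases H2 with ⟨hl2, hk2⟩ | ⟨hl2, hlt2, heq2, hk2⟩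
    · refine Or.inl ⟨hl2, fun k hka hkb => ?_⟩
      rcases Nat.lt_or_ge k (i+1) with hk | hk
      · have hki : k = i := by omega
        simp [hki]
      · rcases Nat.lt_or_ge k j1 with hk' | hk'
        · have := hk1 k hk hk'; linarith
        · have := hk2 k hk' hkb; linarith
    · refine Or.inr ⟨hl2, by omega, by linarith, fun k hka hkb => ?_⟩
      rcases Nat.lt_or_ge k (i+1) with hk | hk
      · have hki : k = i := by omega
        simp [hki]
      · rcases Nat.lt_or_ge k j1 with hk' | hk'
        · have := hk1 k hk hk'; linarith
        · have := hk2 k hk' hkb; linarith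

lemma goB_bal (s : List Char) : ∀ (fuel i : Nat) (sign : Int) (v : List Int),
    s.length + 1 ≤ fuel + i → GoDisj s i (goB s fuel i sign v).2 := by
  intro fuel
  induction fuel with
  | zero =>
    intro i sign v hf
    simp only [goB]
    unfold GoDisj
    refine Or.inl ⟨by omega, fun k hk1 hk2 => ?_⟩
    exact absurd hk2 (by omega)
  | succ fuel ih =>
    intro i sign v hf
    rw [goB]
    by_cases h : i < s.length
    · simp only [h, dif_pos]
      split_ifs with hpm hpar hloc hcl hloc2
      all_goals try
        (first
          | (have hge := goB_ge s fuel (i+1) (sign * -1) v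
             exact parenDisj s i _ _ h hpar hge (ih (i+1) _ v (by omega))
               (ih _ _ _ (by omega)) (fun hl => by rw [goB_stop s fuel _ _ _ hl]))
          | (have hge := goB_ge s fuel (i+1) (sign * 1) v
             exact parenDisj s i _ _ h hpar hge (ih (i+1) _ v (by omega))
               (ih _ _ _ (by omega)) (fun hl => by rw [goB_stop s fuel _ _ _ hl])))
      all_goals try
        (unfold GoDisj
         refine Or.inr ⟨by omega, by omega, ?_, fun k hk1 hk2 => ?_⟩
         · rw [balI_succ s i h]; simp [hcl]
         · have hki : k = i := by omega
           simp [hki])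
      all_goals
        refine shiftDisj s i _ ?_ (ih (i+1) _ _ (by omega))
      all_goals
        rw [balI_succ s i h]
      · rcases hpm with h' | h' <;> simp [h']
      all_goals simp [hpar, hcl]
    · rw [dif_neg h]
      unfold GoDisj
      refine Or.inl ⟨by omega, fun k hk1 hk2 => ?_⟩
      have hki : k = i := by omega
      simp [hki]

-- A's adjSign in the form B computes it
lemma adjSignA_eq (s : List Char) (i : Nat) :
    adjSignA s i = if 0 < i ∧ s[i-1]? = some '-' then 0 else 1 := by
  unfold adjSignA
  rcases Nat.eq_zero_or_pos i with h0 | h0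
  · subst h0; simp
  · rw [if_neg (by omega : ¬ i = 0)]
    by_cases hm : s[i-1]? = some '-' <;> simp [hm, h0]

-- the bridge: A's loop with a 0/1 stack whose top encodes goB's ±1 sign runs goB's segment and
-- then continues with the popped stack
lemma loopA_goB (s : List Char) : ∀ (fuel i : Nat) (t sign : Int) (stk v : List Int),
    s.length + 1 ≤ fuel + i → (sign = 1 ∨ sign = -1) → t = (if sign = 1 then 1 else 0) →
    loopA s 1 (t :: stk) v i
      = loopA s 1 stk (goB s fuel i sign v).1 (goB s fuel i sign v).2 := by
  intro fuel
  induction fuel with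
  | zero =>
    intro i t sign stk v hf hsign ht
    simp only [goB]
    rw [loopA_stop _ _ _ _ _ (by omega), loopA_stop _ _ _ _ _ (by omega)]
  | succ fuel ih =>
    intro i t sign stk v hf hsign ht
    rw [goB]
    by_cases h : i < s.length
    · simp only [h, dif_pos]
      conv_lhs => rw [loopA]
      simp only [h, dif_pos, adjSignA_eq]
      rcases hsign with hs | hs <;> subst hs
      · have ht' : t = 1 := by simpa using ht
        subst ht'
        by_cases hP : 0 < i ∧ s[i-1]? = some '-' <;>
          simp only [hP, if_true, if_false] <;>
          simp <;>
          split_ifs with hpm hpar hcl <;>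
          first
            | rfl
            | exact ih (i+1) _ _ stk _ (by omega) (by norm_num) (by norm_num)
            | exact (ih (i+1) _ _ (_ :: stk) _ (by omega) (by norm_num) (by norm_num)).trans
                (ih _ _ _ stk _
                  (by have hge := goB_ge s fuel (i+1) (-1) v; omega)
                  (by norm_num) (by norm_num))
            | exact (ih (i+1) _ _ (_ :: stk) _ (by omega) (by norm_num) (by norm_num)).trans
                (ih _ _ _ stk _
                  (by have hge := goB_ge s fuel (i+1) 1 v; omega)
                  (by norm_num) (by norm_num))
      · have ht' : t = 0 := by simpa using ht
        subst ht'
        by_cases hP : 0 < i ∧ s[i-1]? = some '-' <;>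
          simp only [hP, if_true, if_false] <;>
          simp <;>
          split_ifs with hpm hpar hcl <;>
          first
            | rfl
            | exact ih (i+1) _ _ stk _ (by omega) (by norm_num) (by norm_num)
            | exact (ih (i+1) _ _ (_ :: stk) _ (by omega) (by norm_num) (by norm_num)).trans
                (ih _ _ _ stk _
                  (by have hge := goB_ge s fuel (i+1) (-1) v; omega)
                  (by norm_num) (by norm_num))
            | exact (ih (i+1) _ _ (_ :: stk) _ (by omega) (by norm_num) (by norm_num)).trans
                (ih _ _ _ stk _
                  (by have hge := goB_ge s fuel (i+1) 1 v; omega)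
                  (by norm_num) (by norm_num))
    · rw [dif_neg h]
      rw [loopA_stop _ _ _ _ _ (by omega), loopA_stop _ _ _ _ _ (by omega)]

-- A's add=0 run subtracts exactly what its add=1 run adds
lemma loopA_zero_eq (s : List Char) : ∀ (m i : Nat) (stk v w : List Int),
    s.length - i ≤ m → v.length = w.length →
    loopA s 0 stk (List.zipWith (· - ·) v w) i
      = List.zipWith (· - ·) v (loopA s 1 stk w i) := by
  intro m
  induction m with
  | zero =>
    intro i stk v w hm hl
    rw [loopA_stop _ _ _ _ _ (by omega), loopA_stop _ _ _ _ _ (by omega)]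
  | succ m ih =>
    intro i stk v w hm hl
    by_cases h : i < s.length
    · conv_lhs => rw [loopA]
      conv_rhs => rw [loopA]
      simp only [h, dif_pos]
      simp only [reduceIte]
      by_cases hpm : s[i] = '+' ∨ s[i] = '-'
      · rw [if_pos hpm, if_pos hpm]
        exact ih _ _ _ _ (by omega) hl
      · rw [if_neg hpm, if_neg hpm]
        by_cases hpar : s[i] = '('
        · rw [if_pos hpar, if_pos hpar]
          exact ih _ _ _ _ (by omega) hl
        · rw [if_neg hpar, if_neg hpar]
          by_cases hcl : s[i] = ')'
          · rw [if_pos hcl, if_pos hcl]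
            exact ih _ _ _ _ (by omega) hl
          · rw [if_neg hcl, if_neg hcl]
            split_ifs <;>
              first
                | omega
                | (refine Eq.trans (congrArg (fun z => loopA s 0 stk z (i+1)) ?_)
                    (ih _ _ _ _ (by omega) (by simp [hl]))
                   apply List.ext_getElem
                   · simp [hl]
                   · intro n h1 h2
                     simp only [List.getElem_modify, List.getElem_zipWith]
                     split_ifs <;> ring)
    · rw [loopA_stop _ _ _ _ _ (by omega), loopA_stop _ _ _ _ _ (by omega)]

-- once every remaining character is '+' or '-', A's loop changes nothing
lemma loopA_pm (s : List Char) : ∀ (m i : Nat) (add : Int) (stk v : List Int),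
    s.length - i ≤ m →
    (∀ q, i ≤ q → q < s.length → (s.getD q ' ' = '+' ∨ s.getD q ' ' = '-')) →
    loopA s add stk v i = v := by
  intro m
  induction m with
  | zero =>
    intro i add stk v hm _
    exact loopA_stop _ _ _ _ _ (by omega)
  | succ m ih =>
    intro i add stk v hm hq
    by_cases h : i < s.length
    · rw [loopA]
      have hqi := hq i le_rfl h
      rw [List.getD_eq_getElem _ _ h] at hqi
      simp only [h, dif_pos]
      rw [if_pos hqi]
      exact ih (i+1) add stk v (by omega) (fun q hq1 hq2 => hq q (by omega) hq2)
    · exact loopA_stop _ _ _ _ _ (by omega)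

lemma evalA_one (s : List Char) (v : List Int)
    (hbal : ∀ k, k < s.length → (balI s (k+1) ≤ 0 ∨
      ∀ q, q < s.length → (q ≤ k ∨ s.getD q ' ' = '+' ∨ s.getD q ' ' = '-'))) :
    loopA s 1 [1] v 0 = (goB s (s.length + 1) 0 1 v).1 := by
  have hb := loopA_goB s (s.length + 1) 0 1 1 [] v (by omega) (Or.inl rfl) (by norm_num)
  have hj := goB_bal s (s.length + 1) 0 1 v (by omega)
  unfold GoDisj at hj
  rcases hj with ⟨hlen, _⟩ | ⟨hle, hlt, heq, _⟩
  · rw [hb, loopA_stop _ _ _ _ _ hlen]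
  · rw [hb]
    have h0 : balI s 0 = 0 := by simp [balI]
    have hj1 : (goB s (s.length + 1) 0 1 v).2 - 1 + 1 = (goB s (s.length + 1) 0 1 v).2 := by
      omega
    apply loopA_pm s s.length _ 1 [] _ (by omega)
    intro q hq1 hq2
    rcases hbal ((goB s (s.length + 1) 0 1 v).2 - 1) (by omega) with hle0 | hq
    · rw [hj1] at hle0
      linarith
    · rcases hq q hq2 with hqk | h | h
      · omega
      · exact Or.inl h
      · exact Or.inr h

lemma zsub_self_zero (v : List Int) :
    List.zipWith (· - ·) v (List.replicate v.length 0) = v := by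
  apply List.ext_getElem
  · simp
  · intro n h1 h2
    simp [List.getElem_zipWith]

-- ===== VERDICT (by name: the statement is the Claim_ definition above) =====
theorem areSame_spec : Claim_equal_areSame := by
  unfold Claim_equal_areSame
  intro expr1 expr2 _hdom hpre
  unfold Spec_areSame
  rcases hpre with ⟨⟨_hc1, hb1⟩, ⟨_hc2, hb2⟩⟩
  unfold areSame areSame_alt evaluateA
  have len1 : (coeffsB expr1.toList).length = 26 := by
    unfold coeffsB
    rw [goB_length]
    simp
  have len2 : (coeffsB expr2.toList).length = 26 := by
    unfold coeffsB
    rw [goB_length]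
    simp
  have e1 : loopA expr1.toList 1 [1] (List.replicate 26 0) 0 = coeffsB expr1.toList :=
    evalA_one expr1.toList _ hb1
  have e2 : loopA expr2.toList 1 [1] (List.replicate 26 0) 0 = coeffsB expr2.toList :=
    evalA_one expr2.toList _ hb2
  have estep : loopA expr2.toList 0 [1] (coeffsB expr1.toList) 0
      = List.zipWith (· - ·) (coeffsB expr1.toList) (coeffsB expr2.toList) := by
    have hz : coeffsB expr1.toList
        = List.zipWith (· - ·) (coeffsB expr1.toList) (List.replicate 26 0) := by
      conv_rhs => rw [← len1]
      rw [zsub_self_zero]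
    calc loopA expr2.toList 0 [1] (coeffsB expr1.toList) 0
        = loopA expr2.toList 0 [1]
            (List.zipWith (· - ·) (coeffsB expr1.toList) (List.replicate 26 0)) 0 := by
          rw [← hz]
      _ = List.zipWith (· - ·) (coeffsB expr1.toList)
            (loopA expr2.toList 1 [1] (List.replicate 26 0) 0) :=
          loopA_zero_eq expr2.toList expr2.toList.length 0 [1] _ _ (by omega) (by simp [len1])
      _ = List.zipWith (· - ·) (coeffsB expr1.toList) (coeffsB expr2.toList) := by rw [e2]
  dsimp only []
  rw [e1, estep]
  by_cases hc : coeffsB expr1.toList = coeffsB expr2.toList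
  · rw [if_pos hc]
    have hany : ((List.range 26).any fun i =>
        (List.zipWith (· - ·) (coeffsB expr1.toList) (coeffsB expr2.toList)).getD i 0 != 0)
          = false := by
      rw [List.any_eq_false]
      intro x hx
      rw [List.mem_range] at hx
      have hx' : x < (List.zipWith (· - ·) (coeffsB expr1.toList)
          (coeffsB expr2.toList)).length := by
        simp [len1, len2]; omega
      simp [hc]
    rw [hany]
    simp
  · rw [if_neg hc]
    have hex : ∃ n, n < 26 ∧ (coeffsB expr1.toList).getD n 0 ≠ (coeffsB expr2.toList).getD n 0 := by
      by_contra hno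
      push Not at hno
      apply hc
      apply List.ext_getElem (len1.trans len2.symm)
      intro n h1 h2
      have hn := hno n (by omega)
      rwa [List.getD_eq_getElem _ _ h1, List.getD_eq_getElem _ _ h2] at hn
    rcases hex with ⟨n, hn26, hne⟩
    have hany : ((List.range 26).any fun i =>
        (List.zipWith (· - ·) (coeffsB expr1.toList) (coeffsB expr2.toList)).getD i 0 != 0)
          = true := by
      rw [List.any_eq_true]
      refine ⟨n, List.mem_range.mpr hn26, ?_⟩
      have hx' : n < (List.zipWith (· - ·) (coeffsB expr1.toList)
          (coeffsB expr2.toList)).length := by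
        simp [len1, len2]; omega
      rw [List.getD_eq_getElem _ _ hx', List.getElem_zipWith]
      rw [List.getD_eq_getElem _ _ (by omega : n < (coeffsB expr1.toList).length),
        List.getD_eq_getElem _ _ (by omega : n < (coeffsB expr2.toList).length)] at hne
      simpa [sub_ne_zero] using hne
    rw [hany]
    simp
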